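/-
  Vorbis/Spec/StartDecoderMapMode.lean — THE CARRY OF THE LOOP RECORDS OF start_decoder's MAPPING, MODE AND CHANNEL SECTIONS
  (segments R8 … R16), on top of the carry layer of sections F / R (Vorbis/Spec/StartDecoderMid.lean: `SecPt`, `SecPt.carry`,
  `Mid.carry_spill`, `SecPt.alloc_call`).

  WHAT IT IS FOR.  The assertions of these sections (Vorbis/Spec/StartDecoderB.lean) are the point `SecPt u₀ g pc k kc z Ac A v`
  plus the loop's own clauses:

      MapLoop  u₀ g pc i A7 A7c Ai A v  =  SecPt … 7 8 8  A7  A v  +  `[R + 10H] = i`, `i ≤ mapping_count`, `MapTrans`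
      ModeLoop u₀ g pc i A v            =  SecPt … 8 8 9  A.1 A v  +  `r14 = i`, `i ≤ mode_count`, `ModeUpTo`
      ChanLoop u₀ g pc i A9 A v         =  SecPt … 9 9 10 A9  A v  +  `r14 = i`, `i ≤ channels`, `previous_length = 0`, `ChanUpTo`, `FYUpTo`

  `SecPt.carry` carries the point over a footprint of `MidWin` windows; `MidWin g k z` lets a step write EVERY field of the running
  section (`[f + Mid.hi k, f + restFrom z)`), which contains what the loop's own clauses read (`mode_count` and the finished mode
  records; the pointer slots of the finished channels).  Each loop therefore gets its own window predicate (`ModeWin g i`, `ChanWin g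
  i`, `MapWin g Ai A m`: `MidWin` with the running section cut down to what iteration `i` may write) and ONE carry lemma:

      MapLoop.secPt, MapWin, MapLoop.carry, MapCur.carry,    a reader call, `ilog`, `error`, the spill `[R + 18H, R + 1CH)`, the stores into
      MapLoop.fields_eq, MapLoop.site_record, MapLoop.toERR  mapping record `i` and into its young `chan` block
      ModeLoop.secPt, ModeLoop.of_secPt, ModeLoop.carry      a reader call, `error`, the stores into mode record `i`
      ChanLoop.secPt, ChanLoop.of_secPt, ChanLoop.carry      the spill `[R + 10H, R + 18H)`, the stores into the slots of channel `i`,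
                                                             `error`, the memset of a young block
      ChanLoop.of_secPt                                      also over a `setup_malloc` (the ghost grows: `SecPt.alloc_call` gives the
                                                             point for the grown ghost, this lemma the loop's clauses)

  USED BY the children of the splits of R9, R10, R12, R14, R16 (Vorbis/Spec/StartDecoderR9.lean … StartDecoderR16.lean).
-/
import Vorbis.Spec.StartDecoderMid
namespace Vorbis.Spec.StartDecoder
open X86 X86.User Asan

set_option maxRecDepth 100000
set_option maxHeartbeats 4000000

/-! ### The mapping loop (R8 … R12) -/

/-- **The point of the mapping loop**: `MapLoop u₀ g pc i A7 A7c Ai A v` is the point `SecPt u₀ g pc 7 8 8 A7 A v` (`Frame`, `Hand`,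
`Mid g 7 8 8`, `rbp = f`) + its own three clauses (`cnt`, `i_le`, `maps`). WHEN: to use the lemmas of the carry layer stated for
`SecPt` (`SecPt.pos`, `SecPt.alloc_call`, `SecPt.alloc_fail`). -/
theorem MapLoop.secPt {u₀ : State} {g : Ghost} {pc : Word} {i : Nat} {A7 A7c Ai : Arena} {A : Arena × List Obj} {v : State}
    (h : MapLoop u₀ g pc i A7 A7c Ai A v) : SecPt u₀ g pc 7 8 8 A7 A v :=
  { frame := h.frame
    hand := h.hand
    mid := h.mid
    rbp := h.rbp }

/-- **A window that a step of the mapping loop's body (R9 … R12) may write**, `m` = the record under construction (`mapAt g mem i`),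
`Ai` = the arena at the head of iteration `i`: the stack below `[R + 8]` (a pushed return address, a callee's frame); the spill slot
`[R + 18H, R + 1CH)` (magnitude / angle / the residue byte; NOT the counter `[R + 10H, R + 14H)` nor the constants ONE20, Z24); the
own frame's free locals `[R + 2CH, R + 598H)` (the spills `[R + 30H, R + 40H)` of R10); the fields of `*f` that `Mid g 7 8 8` does not
read EXCEPT `mapping_count` / `mapping` (`[f + 464, f + 480)`: `MidWin`'s arm "the fields of the running section" is left out) — the
reader's five windows and `error`'s `[f + 140, f + 144)` are inside; the 56 bytes of the record `m`; a window in a block allocated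
since `Ai` (`chan` of record `i`: `MapWin.of_since`). Not written, therefore: the counter, `mapping_count`, `mapping`, the finished
records `[mapping, mapping + 56·i)`, their `chan` blocks (blocks of `Ai`). -/
def MapWin (g : Ghost) (Ai : Arena) (A : Arena × List Obj) (m : Nat) (w : Span) : Prop :=
  (g.R - 408 ≤ w.lo ∧ w.hi ≤ g.R + 8) ∨
  (g.R + 0x18 ≤ w.lo ∧ w.hi ≤ g.R + 0x1c) ∨
  (g.R + 0x2c ≤ w.lo ∧ w.hi ≤ g.R + 0x598) ∨
  (g.f + 8 ≤ w.lo ∧ w.hi ≤ g.f + 24) ∨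
  (g.f + 48 ≤ w.lo ∧ w.hi ≤ g.f + 112) ∨
  (g.f + 136 ≤ w.lo ∧ w.hi ≤ g.f + 152) ∨
  (g.f + 1480 ≤ w.lo ∧ w.hi ≤ g.f + 1749) ∨
  (g.f + 1750 ≤ w.lo ∧ w.hi ≤ g.f + 1784) ∨
  (g.f + 1788 ≤ w.lo ∧ w.hi ≤ g.f + 1808) ∨
  (m ≤ w.lo ∧ w.hi ≤ m + 56) ∨
  Young Ai A w

/-- **A window inside a block allocated since the head of iteration `i`** (`chan` of the record under construction: `MapCur.MP2`,
`AllocRet`'s `Since`) is a `MapWin`. `ha`: the arena layer of the moment (`h.mid.arena`); `he`: `h.maps.exti`. -/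
theorem MapWin.of_since {g : Ghost} {Ai : Arena} {A : Arena × List Obj} {mem : Mem} {m : Nat} {C : Block} {w : Span}
    (ha : ArenaOK A.1 A.2 mem g.f) (he : Ai.Extends A.1) (hC : Since Ai A.1 C)
    (hin : C.base ≤ w.lo ∧ w.hi ≤ C.base + C.size) : MapWin g Ai A m w := by
  unfold MapWin
  exact Or.inr (Or.inr (Or.inr (Or.inr (Or.inr (Or.inr (Or.inr (Or.inr (Or.inr (Or.inr (Young.of_since ha he hC hin))))))))))

/-- **Where the mapping table is**: the record `m(i) = mapping + 56·i`, `i < mapping_count`, lies inside the table's block, which is a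
block of `A7c` (hence of `Ai` and of `A.1`) inside the arena's buffer. -/
theorem MapLoop.table {u₀ : State} {g : Ghost} {pc : Word} {i : Nat} {A7 A7c Ai : Arena} {A : Arena × List Obj} {v : State}
    (h : MapLoop u₀ g pc i A7 A7c Ai A v) :
    A7c.Blk ⟨stb_vorbis.mapping v.mem g.f, 56 * (stb_vorbis.mapping_count v.mem g.f).toNat⟩ ∧
      A.1.B ≤ stb_vorbis.mapping v.mem g.f ∧
      stb_vorbis.mapping v.mem g.f + 56 * (stb_vorbis.mapping_count v.mem g.f).toNat ≤ A.1.B + A.1.L := by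
  have hblk : A7c.Blk ⟨stb_vorbis.mapping v.mem g.f, 56 * (stb_vorbis.mapping_count v.mem g.f).toNat⟩ := h.maps.MP1_block.1
  have hin := arena_inside h.mid.arena ((hblk.mono h.maps.ext7c).mono h.maps.exti)
  exact ⟨hblk, hin.1, hin.2⟩

/-- **A `MapWin` is a window that `Frame` and `Mid g 7 8 8 A7 A` do not read, or the spill slot `[R + 18H, R + 1CH)`** (the form
`Mid.carry_spill` asks for): the record `m(i)` lies in the mapping table, a block allocated since `A7` (`Young A7 A`); a block
allocated since `Ai` was allocated since `A7`. -/
theorem MapWin.mid {u₀ : State} {g : Ghost} {pc : Word} {i : Nat} {A7 A7c Ai : Arena} {A : Arena × List Obj} {v : State} {x : Span}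
    (h : MapLoop u₀ g pc i A7 A7c Ai A v) (hlt : (i : Int) < stb_vorbis.mapping_count v.mem g.f)
    (hx : MapWin g Ai A (mapAt g v.mem i) x) :
    MidWin g 7 8 A7 A x ∨ (g.R + 0x10 ≤ x.lo ∧ x.hi ≤ g.R + 0x28) := by
  have hmaps := h.maps
  have ha := h.mid.arena
  obtain ⟨htab, hT1, hT2⟩ := h.table
  have em : mapAt g v.mem i = stb_vorbis.mapping v.mem g.f + 56 * i := rfl
  have e7 : A7.Extends A.1 := hmaps.ext7.trans (hmaps.ext7c.trans hmaps.exti)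
  have htabS : Since A7 A.1 ⟨stb_vorbis.mapping v.mem g.f, 56 * (stb_vorbis.mapping_count v.mem g.f).toNat⟩ :=
    hmaps.MP1_block.mono (hmaps.ext7c.trans hmaps.exti)
  unfold MapWin at hx
  unfold MidWin
  rcases hx with q | q | q | q | q | q | q | q | q | q | q
  · exact Or.inl (Or.inl q)
  · right
    omega
  · exact Or.inl (Or.inr (Or.inl q))
  · exact Or.inl (Or.inr (Or.inr (Or.inl q)))
  · exact Or.inl (Or.inr (Or.inr (Or.inr (Or.inl q))))
  · exact Or.inl (Or.inr (Or.inr (Or.inr (Or.inr (Or.inl q)))))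
  · exact Or.inl (Or.inr (Or.inr (Or.inr (Or.inr (Or.inr (Or.inr (Or.inl q)))))))
  · exact Or.inl (Or.inr (Or.inr (Or.inr (Or.inr (Or.inr (Or.inr (Or.inr (Or.inl q))))))))
  · exact Or.inl (Or.inr (Or.inr (Or.inr (Or.inr (Or.inr (Or.inr (Or.inr (Or.inr (Or.inl q)))))))))
  · -- the record under construction: inside the mapping table
    left
    refine Or.inr (Or.inr (Or.inr (Or.inr (Or.inr (Or.inr (Or.inr (Or.inr (Or.inr ?_))))))))
    refine ⟨by omega, by omega, ?_⟩
    intro B hB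
    have hd := ha.old_disjoint_since e7 hB htabS
    simp only [vblock] at hd
    omega
  · -- a block allocated since the head of the iteration
    left
    refine Or.inr (Or.inr (Or.inr (Or.inr (Or.inr (Or.inr (Or.inr (Or.inr (Or.inr ?_))))))))
    exact ⟨q.1, q.2.1, fun B hB => q.2.2 B ((hB.mono hmaps.ext7).mono hmaps.ext7c)⟩

/-- **The fields of `*f` that the mapping loop's clauses read are read the same after a step of `MapWin` windows**: `channels`
`[f + 4, f + 8)`, `floor_count` `[f + 176, f + 180)`, `residue_count` `[f + 320, f + 324)` (the windows of `MappingAtOK`),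
`mapping_count` `[f + 464, f + 468)`, `mapping` `[f + 472, f + 480)`. -/
theorem MapLoop.objEq {u₀ : State} {g : Ghost} {pc : Word} {i : Nat} {A7 A7c Ai : Arena} {A : Arena × List Obj} {v : State}
    {mem' : Mem} {ws : List Span} (h : MapLoop u₀ g pc i A7 A7c Ai A v)
    (hlt : (i : Int) < stb_vorbis.mapping_count v.mem g.f) (hs : Mem.SameExcept ws v.mem mem')
    (hok : ∀ x, x ∈ ws → MapWin g Ai A (mapAt g v.mem i) x) :
    ObjEq [(4, 8), (176, 180), (320, 324), (464, 468), (472, 480)] v.mem g.f mem' g.f := by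
  have hp : Pos g A := h.secPt.pos
  obtain ⟨htab, hT1, hT2⟩ := h.table
  have em : mapAt g v.mem i = stb_vorbis.mapping v.mem g.f + 56 * i := rfl
  have p1 := hp.r_eq
  have p2 := hp.ra_lo
  have p3 := hp.ra_hi
  have p5 := hp.f_hi
  have p6 := hp.f_stack
  have p7 := hp.objOut
  apply ObjEq.of_sameExcept hs
  · intro x hx
    simp only [List.mem_cons, List.mem_nil_iff, or_false] at hx
    rcases hx with rfl | rfl | rfl | rfl | rfl <;> simp only [] <;> omega
  · intro x hx y hy
    have k := hok y hy
    unfold MapWin Young at k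
    simp only [List.mem_cons, List.mem_nil_iff, or_false] at hx
    rcases hx with rfl | rfl | rfl | rfl | rfl <;> simp only [] <;> omega

/-- **What a segment of the mapping loop's body re-reads after a step of `MapWin` windows** (a call return): `mapping_count`,
`mapping`, hence the record's address `m(i)`, and `channels` are the same numbers (= the worker's `Pt.fields_eq` of
start_decoder.R10). USE: `rbx = addr (mapAt g w.mem i)`, `lt`, `nchan` in the cut assertion of the returned state. -/
theorem MapLoop.fields_eq {u₀ : State} {g : Ghost} {pc : Word} {i : Nat} {A7 A7c Ai : Arena} {A : Arena × List Obj} {v : State}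
    {mem' : Mem} {ws : List Span} (h : MapLoop u₀ g pc i A7 A7c Ai A v)
    (hlt : (i : Int) < stb_vorbis.mapping_count v.mem g.f) (hs : Mem.SameExcept ws v.mem mem')
    (hok : ∀ x, x ∈ ws → MapWin g Ai A (mapAt g v.mem i) x) :
    stb_vorbis.mapping_count mem' g.f = stb_vorbis.mapping_count v.mem g.f ∧
      stb_vorbis.mapping mem' g.f = stb_vorbis.mapping v.mem g.f ∧ mapAt g mem' i = mapAt g v.mem i ∧
      stb_vorbis.channels mem' g.f = stb_vorbis.channels v.mem g.f ∧ nchan mem' g.f = nchan v.mem g.f := by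
  have hobj := h.objEq hlt hs hok
  have ecount : stb_vorbis.mapping_count mem' g.f = stb_vorbis.mapping_count v.mem g.f := by
    simp only [vacc, voff]
    exact hobj.i32 464 (by decide)
  have etab : stb_vorbis.mapping mem' g.f = stb_vorbis.mapping v.mem g.f := by
    simp only [vacc, voff]
    exact hobj.u64 472 (by decide)
  have echn : stb_vorbis.channels mem' g.f = stb_vorbis.channels v.mem g.f := by
    simp only [vacc, voff]
    exact hobj.i32 4 (by decide)
  refine ⟨ecount, etab, ?_, echn, ?_⟩
  · show stb_vorbis.mapping_at mem' g.f i = stb_vorbis.mapping_at v.mem g.f i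
    unfold stb_vorbis.mapping_at
    rw [etab]
  · rw [nchan_def, nchan_def, echn]

/-- **THE FRAME LEMMA OF THE MAPPING LOOP** (= the worker's `Pt.keeps` / `Pt.carry` of start_decoder.R10, on the carry layer of
sections F / R): `MapLoop` from the cut point `v` to the state `w` (a call return, an exit of the segment) over ONE footprint `hs`
from `v.mem` to `w.mem` (`u_same` chains the segment's own stores, the pushed return addresses and the callees' footprints), every
window a `MapWin` for the record under construction. `hlt`: `i < mapping_count` (`BodyR9.lt`, `MapCur.lt`: inside the body). `hbits`:
the reader's post (`hpost.bits.bits`), else `bits_kept`; `hrbp`: `w_kept.get .rbp rfl`. The clauses of the record under construction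
(`MapCur`) are the segment's own business: `MapLoop.carry` keeps only the loop record. -/
theorem MapLoop.carry {u₀ : State} {g : Ghost} {pc pc' : Word} {i : Nat} {A7 A7c Ai : Arena} {A : Arena × List Obj} {v w : State}
    {ws : List Span} (h : MapLoop u₀ g pc i A7 A7c Ai A v) (hlt : (i : Int) < stb_vorbis.mapping_count v.mem g.f)
    (hs : Mem.SameExcept ws v.mem w.mem) (hun : ShadowUntouched v.mem w.mem)
    (hok : ∀ x, x ∈ ws → MapWin g Ai A (mapAt g v.mem i) x) (hbits : Bits (g.Blk A) g.len w.mem g.f)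
    (hrip : w.rip = pc') (hrsp : w.reg .rsp = addr g.R) (hcode : CodeOK u₀ w.mem) (hinv : abiInv w)
    (hrbp : w.reg .rbp = v.reg .rbp) : MapLoop u₀ g pc' i A7 A7c Ai A w := by
  have hp : Pos g A := h.secPt.pos
  have hmaps := h.maps
  have ha := h.mid.arena
  obtain ⟨htab, hT1, hT2⟩ := h.table
  have em : mapAt g v.mem i = stb_vorbis.mapping v.mem g.f + 56 * i := rfl
  have h1 := hmaps.MP1
  have hmidw : ∀ x, x ∈ ws → MidWin g 7 8 A7 A x ∨ (g.R + 0x10 ≤ x.lo ∧ x.hi ≤ g.R + 0x28) :=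
    fun x hx => MapWin.mid h hlt (hok x hx)
  have p1 := hp.r_eq
  have p2 := hp.ra_lo
  have p3 := hp.ra_hi
  have p4 := hp.f_lo
  have p5 := hp.f_hi
  have p6 := hp.f_stack
  have p7 := hp.objOut
  have p10 := hp.ar_hi
  have p11 := hp.ar_stack
  -- a region off the stack part a step writes, off the writable fields of `*f`, off the arena's buffer
  have eqOff : ∀ lo hi : Nat,
      (hi ≤ g.R - 408 ∨ g.R + 0x598 ≤ lo ∨ (g.R + 8 ≤ lo ∧ hi ≤ g.R + 0x18) ∨ (g.R + 0x1c ≤ lo ∧ hi ≤ g.R + 0x2c)) →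
      (hi ≤ g.f ∨ g.f + 1808 ≤ lo ∨ (g.f + 152 ≤ lo ∧ hi ≤ g.f + 1480)) → (hi ≤ A.1.B ∨ A.1.B + A.1.L ≤ lo) →
      Mem.EqOn lo hi v.mem w.mem := by
    intro lo hi q1 q2 q3
    apply hs.eqOn
    intro x hx
    have k := hok x hx
    unfold MapWin Young at k
    omega
  -- the frame
  have hframe : Frame u₀ g pc' A w := by
    apply h.frame.carry_sec hp hs hun _ hrip hrsp hcode hinv
    intro x hx
    rcases hmidw x hx with k | k
    · exact k.secWin
    · unfold SecWin
      right
      left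
      omega
  -- the point inside the section
  have hconsts : SDFrameConsts 8 w.mem g.R := by
    have hc := h.mid.consts
    have eA : Mem.EqOn (g.R + 8) (g.R + 0x18) v.mem w.mem := eqOff _ _ (by omega) (by omega) (by omega)
    have eB : Mem.EqOn (g.R + 0x1c) (g.R + 0x2c) v.mem w.mem := eqOff _ _ (by omega) (by omega) (by omega)
    refine ⟨hc.aligned, ?_, ?_, ?_, ?_⟩
    · rw [eA.u64 _ (by omega) (by omega) (by omega)]
      exact hc.shadowIdx
    · rw [eB.u32 _ (by omega) (by omega) (by omega)]
      exact hc.one20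
    · intro h7
      omega
    · intro h2 h11
      rw [eB.u32 _ (by omega) (by omega) (by omega)]
      exact hc.z24 h2 h11
  have hmid : Mid g 7 8 8 A7 A w.mem := h.mid.carry_spill hp hs hun hmidw hbits hconsts
  -- the counter
  have hcnt : slot g w.mem 0x10 = i := by
    have eA : Mem.EqOn (g.R + 8) (g.R + 0x18) v.mem w.mem := eqOff _ _ (by omega) (by omega) (by omega)
    have e : slot g w.mem 0x10 = slot g v.mem 0x10 := by
      simp only [slot]
      exact eA.u32 _ (by omega) (by omega) (by omega)
    rw [e]
    exact h.cnt
  -- the fields of `*f` the loop's clauses read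
  have hobj : ObjEq [(4, 8), (176, 180), (320, 324), (464, 468), (472, 480)] v.mem g.f w.mem g.f := h.objEq hlt hs hok
  have ecount : stb_vorbis.mapping_count w.mem g.f = stb_vorbis.mapping_count v.mem g.f := by
    simp only [vacc, voff]
    exact hobj.i32 464 (by decide)
  have etab : stb_vorbis.mapping w.mem g.f = stb_vorbis.mapping v.mem g.f := by
    simp only [vacc, voff]
    exact hobj.u64 472 (by decide)
  have eat : ∀ j, stb_vorbis.mapping_at w.mem g.f j = stb_vorbis.mapping_at v.mem g.f j := by
    intro j
    unfold stb_vorbis.mapping_at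
    rw [etab]
  -- a finished record is kept: it lies in the table below the record under construction
  have hrec : ∀ j : Nat, j < i → (Block.mk (stb_vorbis.mapping_at v.mem g.f j) Off.sizeof.Mapping).Kept v.mem w.mem := by
    intro j hj
    have ej : stb_vorbis.mapping_at v.mem g.f j = stb_vorbis.mapping v.mem g.f + 56 * j := rfl
    apply Block.Kept.of_sameExcept hs
    · intro x hx
      have k := hok x hx
      unfold MapWin Young at k
      rw [ej]
      simp only [voff]
      rcases k with k | k | k | k | k | k | k | k | k | k | k
      · omega
      · omega
      · omega
      · omega
      · omega
      · omega
      · omega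
      · omega
      · omega
      · omega
      · have hd := k.2.2 _ (htab.mono hmaps.ext7c)
        simp only [] at hd
        omega
    · rw [ej]
      simp only [voff]
      omega
  -- a block allocated between `A7c` and the head of the iteration (`chan` of a finished record) is kept
  have hchan : ∀ C, Since A7c Ai C → C.Kept v.mem w.mem := by
    intro C hC
    have hCA : A.1.Blk C := hC.1.mono hmaps.exti
    have hin := arena_inside ha hCA
    have hd0 := ha.old_disjoint_since (hmaps.ext7c.trans hmaps.exti) htab (hC.mono hmaps.exti)
    simp only [vblock] at hd0
    apply Block.Kept.of_sameExcept hs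
    · intro x hx
      have k := hok x hx
      unfold MapWin Young at k
      rcases k with k | k | k | k | k | k | k | k | k | k | k
      · omega
      · omega
      · omega
      · omega
      · omega
      · omega
      · omega
      · omega
      · omega
      · omega
      · exact k.2.2 C hC.1
    · omega
  -- MAPS(i)
  have hmaps' : MapTrans A7 A7c Ai A.1 w.mem g.f i := by
    refine ⟨hmaps.ext7, hmaps.ext7c, hmaps.exti, ?_, ?_, ?_, ?_⟩
    · rw [ecount]
      exact hmaps.n_le
    · rw [ecount]
      exact hmaps.MP1
    · rw [ecount, etab]
      exact hmaps.MP1_block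
    · intro j hj
      rw [eat j]
      have hr := hmaps.record j hj
      exact hr.frame (hobj.sub (by decide)) (hrec j hj) (hchan _ hr.MP2) hr.MP2
  exact
    { frame := hframe
      hand := h.hand
      mid := hmid
      rbp := hrbp.trans h.rbp
      cnt := hcnt
      i_le := by rw [ecount]; exact h.i_le
      maps := hmaps' }

/-- **A check site inside the record under construction**: the `n` bytes at offset `off` of the 56-byte record `m(i)`,
`i < mapping_count` (`m + 0` coupling_steps, `m + 8` chan, `m + 10H` submaps, `m + 11H + s`, `m + 21H + s`), lie inside the mapping table,
a live block. Memory-independent for the segment: state it once at the cut point; at the check state use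
`Vorbis.Spec.check_site h.frame.shadow hun (h.site_record hlt off n … …) (by u_omega)`. -/
theorem MapLoop.site_record {u₀ : State} {g : Ghost} {pc : Word} {i : Nat} {A7 A7c Ai : Arena} {A : Arena × List Obj} {v : State}
    (h : MapLoop u₀ g pc i A7 A7c Ai A v) (hlt : (i : Int) < stb_vorbis.mapping_count v.mem g.f) (off n : Nat)
    (hoff : off + n ≤ 56) (hn : 1 ≤ n) : Site (Live (stackObjs g.frames' ++ A.2)) (mapAt g v.mem i + off) n := by
  obtain ⟨htab, _, _⟩ := h.table
  have htabA : A.1.Blk ⟨stb_vorbis.mapping v.mem g.f, 56 * (stb_vorbis.mapping_count v.mem g.f).toNat⟩ :=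
    (htab.mono h.maps.ext7c).mono h.maps.exti
  have em : mapAt g v.mem i = stb_vorbis.mapping v.mem g.f + 56 * i := rfl
  have hblk : g.Blk A ⟨stb_vorbis.mapping v.mem g.f, 56 * (stb_vorbis.mapping_count v.mem g.f).toNat⟩ := runBlk_setup htabA
  apply Site.of_blk h.mid.env.live hblk
  · simp only []
    omega
  · simp only []
    omega
  · exact hn

/-- **THE RECORD UNDER CONSTRUCTION OVER A STEP** (`MapCur g Ab mem i stage`, the clause `cur` of `BodyR10 … BodyR12` and of the cut
assertions inside R10 … R12; `MapLoop.carry` does not speak of it): `mapping_count`, `m(i)`, `channels` are the same numbers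
(`ecount`, `emap`, `echn`: the 1st, 3rd, 4th component of `MapLoop.fields_eq`); the head of the record `[m, m + 11H)` —
`coupling_steps`, `chan`, `submaps` — reads the same (`hrec`: R10 … R12 store only into `chan`'s bytes and into `[m + 11H, m + 31H)`;
`Mem.SameExcept.eqOn`); from stage 11 on (MP4, MP5 speak of the bytes of `chan`) the `chan` block is kept (`hk`: R11 / R12 after
their stores, a reader call, `error`: `Block.Kept.of_sameExcept`; at stage 10 — R10, which WRITES `chan` — nothing is asked). -/
theorem MapCur.carry {g : Ghost} {Ab : Block → Prop} {mem mem' : Mem} {i stage : Nat} (h : MapCur g Ab mem i stage)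
    (ecount : stb_vorbis.mapping_count mem' g.f = stb_vorbis.mapping_count mem g.f) (emap : mapAt g mem' i = mapAt g mem i)
    (echn : stb_vorbis.channels mem' g.f = stb_vorbis.channels mem g.f)
    (hrec : Mem.EqOn (mapAt g mem i) (mapAt g mem i + 0x11) mem mem') (hb : mapAt g mem i + 0x11 ≤ 2 ^ 64)
    (hk : 11 ≤ stage →
      (Block.mk (Mapping.chan mem (mapAt g mem i)) (Off.sizeof.MappingChannel * nchan mem g.f)).Kept mem mem') :
    MapCur g Ab mem' i stage := by
  have enc : nchan mem' g.f = nchan mem g.f := by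
    rw [nchan_def, nchan_def, echn]
  have e_chan : Mapping.chan mem' (mapAt g mem i) = Mapping.chan mem (mapAt g mem i) := by
    simp only [vacc, voff]
    exact hrec.u64 _ (by omega) (by omega) (by omega)
  have e_sub : Mapping.submaps mem' (mapAt g mem i) = Mapping.submaps mem (mapAt g mem i) := by
    simp only [vacc, voff]
    exact hrec.u8 _ (by omega) (by omega) (by omega)
  have e_steps : Mapping.coupling_steps mem' (mapAt g mem i) = Mapping.coupling_steps mem (mapAt g mem i) := by
    simp only [vacc, voff]
    exact hrec.u16 _ (by omega) (by omega) (by omega)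
  have eat : ∀ j, Mapping.chan_at mem' (mapAt g mem i) j = Mapping.chan_at mem (mapAt g mem i) j := by
    intro j
    unfold Mapping.chan_at
    rw [e_chan]
  have hsteps := h.MP4_steps
  -- the three bytes of channel record `j < C`, once the `chan` block is kept
  have ech : 11 ≤ stage → ∀ j : Nat, (j : Int) < stb_vorbis.channels mem g.f → ∀ o, o < 3 →
      mem'.u8 (Mapping.chan_at mem (mapAt g mem i) j + o) = mem.u8 (Mapping.chan_at mem (mapAt g mem i) j + o) := by
    intro h11 j hj o ho
    apply (hk h11).u8
    · simp only [vacc, voff]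
      omega
    · simp only [nchan_def, vacc, voff] at hj ⊢
      omega
  refine
    { lt := by rw [ecount]; exact h.lt
      MP2 := by rw [emap, e_chan, enc]; exact h.MP2
      MP3 := by rw [emap, e_sub]; exact h.MP3
      MP4_steps := by rw [emap, e_steps, echn]; exact h.MP4_steps
      steps_pos := ?_
      MP4 := ?_
      MP5 := ?_ }
  · intro h10
    rw [emap, e_steps]
    exact h.steps_pos h10
  · intro h11 k hk'
    rw [emap, e_steps] at hk'
    rw [emap]
    have hkC : (k : Int) < stb_vorbis.channels mem g.f := by omega
    have hold := h.MP4 h11 k hk'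
    unfold Mapping.CouplingOK at hold ⊢
    simp only [MappingChannel.magnitude, MappingChannel.angle, voff] at hold ⊢
    rw [eat k, ech h11 k hkC 0 (by omega), ech h11 k hkC 1 (by omega), echn]
    exact hold
  · intro h12 j hj
    rw [echn] at hj
    rw [emap]
    have hold := h.MP5 h12 j hj
    unfold Mapping.MuxOK at hold ⊢
    simp only [MappingChannel.mux, voff] at hold ⊢
    rw [eat j, ech (by omega) j hj 2 (by omega), e_sub]
    exact hold

/-- **An error exit of the mapping loop's body** (`call error ; jmp 113b22`, eax = 0; ten stubs in R9 … R12): SD.ERR from the loop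
record at the epilogue's address — H2, H3 from the finished groups of `Mid g 7 8 8`, H5 from MAPS(i) (the mapping table is a block).
Nothing about the record under construction is needed. HOW: `MapLoop.carry` over the push and `error`'s window `[f + 140, f + 144)`
to the state after the `jmp`, `hax` from `error`'s post (`rax = 0`). -/
theorem MapLoop.toERR {u₀ : State} {g : Ghost} {i : Nat} {A7 A7c Ai : Arena} {A : Arena × List Obj} {v : State}
    (h : MapLoop u₀ g pc_ERR i A7 A7c Ai A v) (hax : (v.reg .rax).toNat % 2 ^ 32 = 0) : AtERR u₀ g v := by
  have h5 : H5 (g.Blk A) v.mem g.f :=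
    H5.mono (MappingDeinitOK.h5 h.maps.upTo.deinit h.maps.MP1.2) (fun _ hB => runBlk_setup hB)
  have hfail : Failed g.len g.f (g.Live A) A v.mem :=
    h.mid.failed (by omega) (h.mid.h2_done (by omega)) (h.mid.h3_done (by omega)) h5
  exact ⟨A, h.frame, h.hand, Or.inl ⟨hax, hfail⟩⟩

/-! ### The mode loop (R13, R14) -/

/-- The point inside the mode section that a `ModeLoop` contains (`Frame`, `Hand`, `Mid g 8 8 9`, `rbp = f`). WHEN: to apply the
lemmas of Vorbis/Spec/StartDecoderMid.lean (`SecPt.pos`, `SecPt.carry`) to a loop assertion. -/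
theorem ModeLoop.secPt {u₀ : State} {g : Ghost} {pc : Word} {i : Nat} {A : Arena × List Obj} {v : State}
    (h : ModeLoop u₀ g pc i A v) : SecPt u₀ g pc 8 8 9 A.1 A v :=
  ⟨h.frame, h.hand, h.mid, h.rbp⟩

/-- **`ModeLoop` from the point at another state** and the loop's own clauses: r14 is kept, and the windows `ModeUpTo.wins i` of
`*f` (`mapping_count`; `mode_count` and the mode records below `i`) read the same. WHEN: after `SecPt.carry`, when the step's
windows are not described by `ModeWin` (else `ModeLoop.carry`). -/
theorem ModeLoop.of_secPt {u₀ : State} {g : Ghost} {pc pc' : Word} {i : Nat} {A : Arena × List Obj} {v w : State}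
    (h : ModeLoop u₀ g pc i A v) (hpt : SecPt u₀ g pc' 8 8 9 A.1 A w) (hr14 : w.reg .r14 = v.reg .r14)
    (he : ObjEq (ModeUpTo.wins i) v.mem g.f w.mem g.f) : ModeLoop u₀ g pc' i A w := by
  have hmodes := h.modes.transfer_below he
  exact
    { frame := hpt.frame
      hand := hpt.hand
      mid := hpt.mid
      rbp := hpt.rbp
      r14 := hr14.trans h.r14
      i_le := hmodes.n_le
      modes := hmodes }

/-- **A window that a step of iteration `i` of the mode loop may write**: a `MidWin g 8 9` whose part in the running section
`[f + 480, f + 868)` is cut down to the mode records from `i` on (`[f + 484 + 6·i, f + 868)`: `mode_count` and the finished records stay) —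
the stack below `[R + 8]`, the own frame's free locals, `setup_memory_required` …, the reader's fields, `eof` / `error`, the paging
and bit fields, a young block. -/
def ModeWin (g : Ghost) (i : Nat) (A : Arena × List Obj) (w : Span) : Prop :=
  (g.R - 408 ≤ w.lo ∧ w.hi ≤ g.R + 8) ∨
  (g.R + 0x2c ≤ w.lo ∧ w.hi ≤ g.R + 0x598) ∨
  (g.f + 8 ≤ w.lo ∧ w.hi ≤ g.f + 24) ∨
  (g.f + 48 ≤ w.lo ∧ w.hi ≤ g.f + 112) ∨
  (g.f + 136 ≤ w.lo ∧ w.hi ≤ g.f + 152) ∨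
  (g.f + 484 + 6 * i ≤ w.lo ∧ w.hi ≤ g.f + 868) ∨
  (g.f + 1480 ≤ w.lo ∧ w.hi ≤ g.f + 1749) ∨
  (g.f + 1750 ≤ w.lo ∧ w.hi ≤ g.f + 1784) ∨
  (g.f + 1788 ≤ w.lo ∧ w.hi ≤ g.f + 1808) ∨
  Young A.1 A w

/-- A window of the mode loop is a window of the mode section. -/
theorem ModeWin.midWin {g : Ghost} {i : Nat} {A : Arena × List Obj} {w : Span} (h : ModeWin g i A w) :
    MidWin g 8 9 A.1 A w := by
  have e1 : Mid.hi 8 = 480 := by decide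
  have e2 : restFrom 9 = 868 := by decide
  unfold ModeWin at h
  unfold MidWin
  rw [e1, e2]
  rcases h with h | h | h | h | h | h | h | h | h | h
  · exact Or.inl h
  · exact Or.inr (Or.inl h)
  · exact Or.inr (Or.inr (Or.inl h))
  · exact Or.inr (Or.inr (Or.inr (Or.inl h)))
  · exact Or.inr (Or.inr (Or.inr (Or.inr (Or.inl h))))
  · exact Or.inr (Or.inr (Or.inr (Or.inr (Or.inr (Or.inl (by omega))))))
  · exact Or.inr (Or.inr (Or.inr (Or.inr (Or.inr (Or.inr (Or.inl h))))))
  · exact Or.inr (Or.inr (Or.inr (Or.inr (Or.inr (Or.inr (Or.inr (Or.inl h)))))))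
  · exact Or.inr (Or.inr (Or.inr (Or.inr (Or.inr (Or.inr (Or.inr (Or.inr (Or.inl h))))))))
  · exact Or.inr (Or.inr (Or.inr (Or.inr (Or.inr (Or.inr (Or.inr (Or.inr (Or.inr h))))))))

/-- **THE CARRY LEMMA OF THE MODE LOOP** (state level, the form of `SecPt.carry`): `ModeLoop` from the cut point `v` to the state `w` (a
call return, an exit), `hs` = ONE footprint from `v.mem` to `w.mem`, every window a `ModeWin g i`. `hbits`: the reader's post
(`hpost.bits.bits`), else `bits_kept`; `hrbp`, `hr14`: `w_kept.get .rbp rfl`, `w_kept.get .r14 rfl` (callee-saved). The counter `i`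
stays; the exit to the next iteration is `ModeUpTo.succ` on the result. -/
theorem ModeLoop.carry {u₀ : State} {g : Ghost} {pc pc' : Word} {i : Nat} {A : Arena × List Obj} {v w : State}
    {ws : List Span} (h : ModeLoop u₀ g pc i A v) (hs : Mem.SameExcept ws v.mem w.mem)
    (hun : ShadowUntouched v.mem w.mem) (hok : ∀ x, x ∈ ws → ModeWin g i A x) (hbits : Bits (g.Blk A) g.len w.mem g.f)
    (hrip : w.rip = pc') (hrsp : w.reg .rsp = addr g.R) (hcode : CodeOK u₀ w.mem) (hinv : abiInv w)
    (hrbp : w.reg .rbp = v.reg .rbp) (hr14 : w.reg .r14 = v.reg .r14) : ModeLoop u₀ g pc' i A w := by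
  have hp := h.secPt.pos
  have hpt : SecPt u₀ g pc' 8 8 9 A.1 A w :=
    h.secPt.carry hs hun (fun x hx => (hok x hx).midWin) hbits hrip hrsp hcode hinv hrbp
  apply h.of_secPt hpt hr14
  -- the windows `ModeUpTo.wins i` = `[f + 464, f + 468)`, `[f + 480, f + 484 + 6·i)` meet no `ModeWin`
  obtain ⟨p1, p2, p3, p4, p5, p6, p7, p8, p9, p10, p11, p12, p13, p14⟩ := hp
  have hile := h.i_le
  have hmd := h.modes.MD1
  apply ObjEq.of_sameExcept hs
  · intro x hx
    simp only [ModeUpTo.wins, List.mem_cons, List.mem_nil_iff, or_false] at hx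
    rcases hx with rfl | rfl
    · simp only []
      omega
    · simp only []
      omega
  · intro x hx s hsm
    have q := hok s hsm
    unfold ModeWin Young at q
    simp only [ModeUpTo.wins, List.mem_cons, List.mem_nil_iff, or_false] at hx
    rcases hx with rfl | rfl
    · simp only []
      omega
    · simp only []
      omega

/-! ### The channel loop (R15, R16) -/

/-- The point inside the channel loop that a `ChanLoop` contains (`Frame`, `Hand`, `Mid g 9 9 10` over the snapshot `A9`, `rbp = f`).
WHEN: to apply `SecPt.pos`, `SecPt.alloc_call`, `SecPt.alloc_fail` … to a loop assertion. -/
theorem ChanLoop.secPt {u₀ : State} {g : Ghost} {pc : Word} {i : Nat} {A9 : Arena} {A : Arena × List Obj} {v : State}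
    (h : ChanLoop u₀ g pc i A9 A v) : SecPt u₀ g pc 9 9 10 A9 A v :=
  ⟨h.frame, h.hand, h.mid, h.rbp⟩

/-- **`ChanLoop` from the point at another state, possibly for a GROWN ghost** (`A'`: after a successful `setup_malloc`, from
`SecPt.alloc_call`; `A' = A` with `Arena.Extends.refl _` otherwise) and the loop's own clauses: r14 is kept; `channels`,
`blocksize_1`, `previous_length`, the slot of `longest_floorlist` `[R + 28H]` and the three pointer slots of the channels below `i`
read the same. The blocks of the finished channels, allocated since `A9`, are still blocks of the grown arena (`Since.mono`). -/
theorem ChanLoop.of_secPt {u₀ : State} {g : Ghost} {pc pc' : Word} {i : Nat} {A9 : Arena} {A A' : Arena × List Obj}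
    {v w : State} (h : ChanLoop u₀ g pc i A9 A v) (hpt : SecPt u₀ g pc' 9 9 10 A9 A' w) (hext : A.1.Extends A'.1)
    (hr14 : w.reg .r14 = v.reg .r14)
    (hch : stb_vorbis.channels w.mem g.f = stb_vorbis.channels v.mem g.f)
    (hb1 : stb_vorbis.blocksize_1 w.mem g.f = stb_vorbis.blocksize_1 v.mem g.f)
    (hpl : stb_vorbis.previous_length w.mem g.f = stb_vorbis.previous_length v.mem g.f)
    (hlf : w.mem.i32 (g.R + 0x28) = v.mem.i32 (g.R + 0x28))
    (hcb : ∀ j, j < i → stb_vorbis.channel_buffers w.mem g.f j = stb_vorbis.channel_buffers v.mem g.f j)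
    (hpw : ∀ j, j < i → stb_vorbis.previous_window w.mem g.f j = stb_vorbis.previous_window v.mem g.f j)
    (hfy : ∀ j, j < i → stb_vorbis.finalY w.mem g.f j = stb_vorbis.finalY v.mem g.f j) :
    ChanLoop u₀ g pc' i A9 A' w := by
  have hfy' : FYUpTo (Since A9 A'.1) v.mem g.f (v.mem.i32 (g.R + 0x28)) i :=
    h.fy.reblk (fun _ _ hB => hB.mono hext)
  exact
    { frame := hpt.frame
      hand := hpt.hand
      mid := hpt.mid
      rbp := hpt.rbp
      r14 := hr14.trans h.r14
      i_le := by
        rw [hch]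
        exact h.i_le
      prev0 := by
        rw [hpl]
        exact h.prev0
      chan := h.chan.congr hcb hpw hb1 (fun _ hB => hB.mono hext)
      fy := by
        rw [hlf]
        exact hfy'.of_eq hfy }

/-- **A window that a step of iteration `i` of the channel loop may write**: the stack below `[R + 8]` (a pushed return address, a
callee's frame); THE SPILL `[R + 10H, R + 18H)` (R16 keeps `setup_malloc`'s result there over the check call: 0x116680, 0x1166c4; no
frame constant of `SDFrameConsts 9` lives there); the own frame's free locals; `setup_memory_required` …; the reader's fields; `eof` /
`error`; THE POINTER SLOTS OF THE CHANNELS FROM `i` ON (`channel_buffers[i ..]`, `previous_window[i ..]`, `finalY[i ..]`); the paging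
and bit fields; a window in a block allocated since the snapshot `A9` (the memset of `channel_buffers[i]`: `Young.of_since`). NOT:
`channels`, `blocksize_1` (`Mid`'s windows), `previous_length`, the slot `[R + 28H]`, a slot of a finished channel. -/
def ChanWin (g : Ghost) (i : Nat) (A9 : Arena) (A : Arena × List Obj) (w : Span) : Prop :=
  (g.R - 408 ≤ w.lo ∧ w.hi ≤ g.R + 8) ∨
  (g.R + 0x10 ≤ w.lo ∧ w.hi ≤ g.R + 0x18) ∨
  (g.R + 0x2c ≤ w.lo ∧ w.hi ≤ g.R + 0x598) ∨
  (g.f + 8 ≤ w.lo ∧ w.hi ≤ g.f + 24) ∨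
  (g.f + 48 ≤ w.lo ∧ w.hi ≤ g.f + 112) ∨
  (g.f + 136 ≤ w.lo ∧ w.hi ≤ g.f + 152) ∨
  (g.f + 872 + 8 * i ≤ w.lo ∧ w.hi ≤ g.f + 1000) ∨
  (g.f + 1128 + 8 * i ≤ w.lo ∧ w.hi ≤ g.f + 1256) ∨
  (g.f + 1264 + 8 * i ≤ w.lo ∧ w.hi ≤ g.f + 1392) ∨
  (g.f + 1480 ≤ w.lo ∧ w.hi ≤ g.f + 1749) ∨
  (g.f + 1750 ≤ w.lo ∧ w.hi ≤ g.f + 1784) ∨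
  (g.f + 1788 ≤ w.lo ∧ w.hi ≤ g.f + 1808) ∨
  Young A9 A w

/-- A window of the channel loop is a window of its section, or the spill into `[R + 10H, R + 18H)` (the form `Mid.carry_spill`
asks for). -/
theorem ChanWin.midWin {g : Ghost} {i : Nat} {A9 : Arena} {A : Arena × List Obj} {w : Span} (h : ChanWin g i A9 A w) :
    MidWin g 9 10 A9 A w ∨ (g.R + 0x10 ≤ w.lo ∧ w.hi ≤ g.R + 0x28) := by
  have e1 : Mid.hi 9 = 868 := by decide
  have e2 : restFrom 10 = 1400 := by decide
  unfold ChanWin at h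
  unfold MidWin
  rw [e1, e2]
  rcases h with h | h | h | h | h | h | h | h | h | h | h | h | h
  · exact Or.inl (Or.inl h)
  · exact Or.inr (by omega)
  · exact Or.inl (Or.inr (Or.inl h))
  · exact Or.inl (Or.inr (Or.inr (Or.inl h)))
  · exact Or.inl (Or.inr (Or.inr (Or.inr (Or.inl h))))
  · exact Or.inl (Or.inr (Or.inr (Or.inr (Or.inr (Or.inl h)))))
  · exact Or.inl (Or.inr (Or.inr (Or.inr (Or.inr (Or.inr (Or.inl (by omega)))))))
  · exact Or.inl (Or.inr (Or.inr (Or.inr (Or.inr (Or.inr (Or.inl (by omega)))))))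
  · exact Or.inl (Or.inr (Or.inr (Or.inr (Or.inr (Or.inr (Or.inl (by omega)))))))
  · exact Or.inl (Or.inr (Or.inr (Or.inr (Or.inr (Or.inr (Or.inr (Or.inl h)))))))
  · exact Or.inl (Or.inr (Or.inr (Or.inr (Or.inr (Or.inr (Or.inr (Or.inr (Or.inl h))))))))
  · exact Or.inl (Or.inr (Or.inr (Or.inr (Or.inr (Or.inr (Or.inr (Or.inr (Or.inr (Or.inl h)))))))))
  · exact Or.inl (Or.inr (Or.inr (Or.inr (Or.inr (Or.inr (Or.inr (Or.inr (Or.inr (Or.inr h)))))))))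

/-- A window of the channel loop is a window that `Frame` does not read. -/
theorem ChanWin.secWin {g : Ghost} {i : Nat} {A9 : Arena} {A : Arena × List Obj} {w : Span} (h : ChanWin g i A9 A w) :
    SecWin g A w := by
  unfold ChanWin Young at h
  unfold SecWin
  omega

/-- **What the channel loop's own clauses read is the same after a step of `ChanWin` windows**: `channels`, `blocksize_1`,
`previous_length`, the slot `[R + 28H]`, the three pointer slots of every channel below `i` (`i ≤ 16`: `ChanLoop.i_le` with HD1) — the
hypotheses of `ChanLoop.of_secPt`.
The windows may also be those of an allocator's footprint (`AllocWin`: the callee's frame, `[f + 8, f + 12)`, `[f + 128, f + 136)`, shadow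
bytes of the arena's buffer — `allocWins_ok`). WHEN: inside `ChanLoop.carry`; directly, with `ChanLoop.of_secPt`, over a `setup_malloc`
call (once for the own stores and the pushed return address up to the callee's entry, once for the callee's footprint). -/
theorem ChanWin.fields_same {g : Ghost} {i : Nat} {A9 : Arena} {A : Arena × List Obj} {m m' : Mem} {ws : List Span}
    (hp : Pos g A) (hi : i ≤ 16) (hs : Mem.SameExcept ws m m')
    (hok : ∀ x, x ∈ ws → ChanWin g i A9 A x ∨ AllocWin g A x) :
    stb_vorbis.channels m' g.f = stb_vorbis.channels m g.f ∧
    stb_vorbis.blocksize_1 m' g.f = stb_vorbis.blocksize_1 m g.f ∧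
    stb_vorbis.previous_length m' g.f = stb_vorbis.previous_length m g.f ∧
    m'.i32 (g.R + 0x28) = m.i32 (g.R + 0x28) ∧
    (∀ j, j < i → stb_vorbis.channel_buffers m' g.f j = stb_vorbis.channel_buffers m g.f j) ∧
    (∀ j, j < i → stb_vorbis.previous_window m' g.f j = stb_vorbis.previous_window m g.f j) ∧
    (∀ j, j < i → stb_vorbis.finalY m' g.f j = stb_vorbis.finalY m g.f j) := by
  obtain ⟨p1, p2, p3, p4, p5, p6, p7, p8, p9, p10, p11, p12, p13, p14⟩ := hp
  -- the ranges that no `ChanWin` meets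
  have Ea : Mem.EqOn g.f (g.f + 8) m m' := by
    apply hs.eqOn
    intro x hx
    have q := hok x hx
    unfold ChanWin Young AllocWin at q
    omega
  have Eb : Mem.EqOn (g.f + 152) (g.f + 872 + 8 * i) m m' := by
    apply hs.eqOn
    intro x hx
    have q := hok x hx
    unfold ChanWin Young AllocWin at q
    omega
  have Ec : Mem.EqOn (g.f + 1000) (g.f + 1128 + 8 * i) m m' := by
    apply hs.eqOn
    intro x hx
    have q := hok x hx
    unfold ChanWin Young AllocWin at q
    omega
  have Ed : Mem.EqOn (g.f + 1256) (g.f + 1264 + 8 * i) m m' := by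
    apply hs.eqOn
    intro x hx
    have q := hok x hx
    unfold ChanWin Young AllocWin at q
    omega
  have Er : Mem.EqOn (g.R + 0x18) (g.R + 0x2c) m m' := by
    apply hs.eqOn
    intro x hx
    have q := hok x hx
    unfold ChanWin Young AllocWin at q
    omega
  refine ⟨?_, ?_, ?_, ?_, ?_, ?_, ?_⟩
  · simp only [vacc, voff]
    exact Ea.i32 _ (by omega) (by omega) (by omega)
  · simp only [vacc, voff]
    exact Eb.i32 _ (by omega) (by omega) (by omega)
  · simp only [vacc, voff]
    exact Ed.i32 _ (by omega) (by omega) (by omega)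
  · exact Er.i32 _ (by omega) (by omega) (by omega)
  · intro j hj
    simp only [vacc, voff]
    exact Eb.ptr _ (by omega) (by omega) (by omega)
  · intro j hj
    simp only [vacc, voff]
    exact Ec.ptr _ (by omega) (by omega) (by omega)
  · intro j hj
    simp only [vacc, voff]
    exact Ed.ptr _ (by omega) (by omega) (by omega)

/-- **The frame constants of the channel loop over a step of `ChanWin` windows** (`SDFrameConsts 9`: the shadow index `[R + 8]`, ONE20
`[R + 20H]`, Z24 `[R + 24H]`; Z10 is void since the mapping loop): the spill `[R + 10H, R + 18H)` meets none of them. WHEN: the `hconsts`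
of `Mid.carry_spill`. -/
theorem ChanWin.consts_same {g : Ghost} {i : Nat} {A9 : Arena} {A : Arena × List Obj} {m m' : Mem} {ws : List Span}
    (hp : Pos g A) (hc : SDFrameConsts 9 m g.R) (hs : Mem.SameExcept ws m m') (hok : ∀ x, x ∈ ws → ChanWin g i A9 A x) :
    SDFrameConsts 9 m' g.R := by
  obtain ⟨p1, p2, p3, p4, p5, p6, p7, p8, p9, p10, p11, p12, p13, p14⟩ := hp
  have E1 : Mem.EqOn (g.R + 8) (g.R + 0x10) m m' := by
    apply hs.eqOn
    intro x hx
    have q := hok x hx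
    unfold ChanWin Young at q
    omega
  have E2 : Mem.EqOn (g.R + 0x18) (g.R + 0x28) m m' := by
    apply hs.eqOn
    intro x hx
    have q := hok x hx
    unfold ChanWin Young at q
    omega
  obtain ⟨h1, h2, h3, _, h5⟩ := hc
  refine ⟨h1, ?_, ?_, ?_, ?_⟩
  · rw [E1.u64 (g.R + 8) (by omega) (by omega) (by omega)]
    exact h2
  · rw [E2.u32 (g.R + 0x20) (by omega) (by omega) (by omega)]
    exact h3
  · intro hk
    omega
  · intro hk1 hk2
    rw [E2.u32 (g.R + 0x24) (by omega) (by omega) (by omega)]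
    exact h5 hk1 hk2

/-- **THE CARRY LEMMA OF THE CHANNEL LOOP** (state level, the form of `SecPt.carry`; the ghost arena stays): `ChanLoop` from the cut
point `v` to the state `w`, `hs` = ONE footprint from `v.mem` to `w.mem`, every window a `ChanWin g i` (the spill of `setup_malloc`'s
result, the checked stores into the three slots of channel `i`, pushed return addresses, `error`'s store, the memset of
`channel_buffers[i]`: a young block). `hbits`: `bits_kept` (no reader is called in R15 / R16); `hrbp`, `hr14`: `w_kept.get … rfl`. A
`setup_malloc` call: `SecPt.alloc_call` / `.alloc_fail` for the point (with `FInv.carry`, `Mid.carry_spill`, `ChanWin.consts_same`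
up to the callee's entry), then `ChanLoop.of_secPt` with `ChanWin.fields_same` twice (the own stores; the allocator's footprint,
whose windows `[f + 8, f + 12)`, `[f + 128, f + 132)`, the stack and the shadow meet none of the fields). -/
theorem ChanLoop.carry {u₀ : State} {g : Ghost} {pc pc' : Word} {i : Nat} {A9 : Arena} {A : Arena × List Obj} {v w : State}
    {ws : List Span} (h : ChanLoop u₀ g pc i A9 A v) (hs : Mem.SameExcept ws v.mem w.mem)
    (hun : ShadowUntouched v.mem w.mem) (hok : ∀ x, x ∈ ws → ChanWin g i A9 A x) (hbits : Bits (g.Blk A) g.len w.mem g.f)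
    (hrip : w.rip = pc') (hrsp : w.reg .rsp = addr g.R) (hcode : CodeOK u₀ w.mem) (hinv : abiInv w)
    (hrbp : w.reg .rbp = v.reg .rbp) (hr14 : w.reg .r14 = v.reg .r14) : ChanLoop u₀ g pc' i A9 A w := by
  have hp := h.secPt.pos
  have hconsts := ChanWin.consts_same hp h.mid.consts hs hok
  have hpt : SecPt u₀ g pc' 9 9 10 A9 A w :=
    { frame := h.frame.carry_sec hp hs hun (fun x hx => (hok x hx).secWin) hrip hrsp hcode hinv
      hand := h.hand
      mid := h.mid.carry_spill hp hs hun (fun x hx => (hok x hx).midWin) hbits hconsts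
      rbp := hrbp.trans h.rbp }
  have hi16 : i ≤ 16 := by
    have h1 := h.i_le
    have h2 := h.mid.header.HD1
    omega
  obtain ⟨e1, e2, e3, e4, e5, e6, e7⟩ := ChanWin.fields_same hp hi16 hs (fun x hx => Or.inl (hok x hx))
  exact h.of_secPt hpt (Arena.Extends.refl _) hr14 e1 e2 e3 e4 e5 e6 e7

end Vorbis.Spec.StartDecoder
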